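-- pv_equiv track=rewrite | github.com/JeiKeiLim/TIL | coding_test/programmers/불량_사용자.py | solution
-- ===== SOURCE A (Python) =====
-- from typing import List
--
-- def solution(user_id: List[str], banned_id: List[str]) -> int:
--     id_by_length = [[] for _ in range(9)]
--     for id in user_id:
--         id_by_length[len(id)].append(id)
--
--     ban_candidates = [[] for _ in range(len(banned_id))]
--     for i, bid in enumerate(banned_id):
--         len_bid = len(bid)
--         for uid in id_by_length[len_bid]:
--             is_all_match = True
--             for j in range(len_bid):
--                 if bid[j] == "*":
--                     continue
--                 if bid[j] != uid[j]:
--                     is_all_match = False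
--                     break
--             if is_all_match:
--                 ban_candidates[i].append(uid)
--
--     stack = [(set([ban_candidate]), 1) for ban_candidate in ban_candidates[0]]
--     final_candidates = set()
--     while stack:
--         local_candidate, step = stack.pop()
--
--         if step == len(banned_id):
--             final_candidates.add(tuple(sorted(local_candidate)))
--             continue
--         for ban_candidate in ban_candidates[step]:
--             next_candidate = local_candidate.copy()
--             next_candidate.add(ban_candidate)
--             if len(next_candidate) < (step + 1):
--                 continue
--             stack.append((next_candidate, step + 1))
--
--     return len(final_candidates)
-- ===== SOURCE B (Python) =====
-- from typing import List
--
--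
-- def _matches(bid: str, uid: str) -> bool:
--     return len(uid) == len(bid) and all(b == "*" or b == u for b, u in zip(bid, uid))
--
--
-- def solution(user_id: List[str], banned_id: List[str]) -> int:
--     candidates = [[uid for uid in user_id if _matches(bid, uid)] for bid in banned_id]
--
--     result = set()
--
--     def rec(step, chosen):
--         if step == len(banned_id):
--             result.add(tuple(sorted(chosen)))
--             return
--         for uid in candidates[step]:
--             if uid not in chosen:
--                 rec(step + 1, chosen | {uid})
--
--     rec(0, set())
--     return len(result)
-- ===== Notes on version B (the rewrite author's own statement) =====
-- stated objective: alternative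
-- what changed: A buckets user ids by length into a 9-slot table, builds per-pattern candidate lists from the buckets with an index-by-index wildcard loop, and enumerates covering sets with an explicit stack whose prune is a set-size check; B builds each candidate list by a direct zip-based filter over user_id and enumerates with a recursive backtracking helper that skips already-chosen users.
import Mathlib
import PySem

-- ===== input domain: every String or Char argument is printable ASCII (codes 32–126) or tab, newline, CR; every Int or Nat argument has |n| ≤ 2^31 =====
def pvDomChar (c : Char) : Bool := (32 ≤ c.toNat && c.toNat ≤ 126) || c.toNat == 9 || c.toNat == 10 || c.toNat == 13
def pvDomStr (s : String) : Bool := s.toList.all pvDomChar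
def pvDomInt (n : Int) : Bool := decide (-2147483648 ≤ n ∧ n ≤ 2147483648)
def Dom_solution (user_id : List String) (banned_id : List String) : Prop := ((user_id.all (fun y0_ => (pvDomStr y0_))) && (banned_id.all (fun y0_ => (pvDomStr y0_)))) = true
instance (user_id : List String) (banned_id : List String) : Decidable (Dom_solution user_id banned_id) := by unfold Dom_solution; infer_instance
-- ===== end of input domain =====

-- B replaces A's length-bucket candidate table and explicit stack DFS by a direct filter per
-- pattern and a recursive backtracking enumeration; objective: alternative decomposition.
-- The equivalence is about the RETURN value (neither program mutates its arguments).

-- ===== PORT A =====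
-- A's inner j-loop over the pattern's positions ('*' wildcard, break on first mismatch);
-- at the algorithm's call sites bid and uid have equal length.
def pyMatchA : List Char → List Char → Bool
  | [], _ => true
  | _ :: _, [] => true
  | b :: bs, u :: us => if b = '*' then pyMatchA bs us else if b ≠ u then false else pyMatchA bs us

-- the body of A's first loop: id_by_length[len(id)].append(id)
def bucketStep (acc : List (List String)) (id : String) : List (List String) :=
  acc.set id.toList.length ((acc.getD id.toList.length []) ++ [id])

-- A's while-stack loop; the head of the list is the top of Python's stack; the fuel argument
-- only makes the recursion total (the caller passes provably sufficient fuel)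
def aLoop (cands : List (List String)) (n : Nat) :
    Nat → List (PySem.Set String × Nat) → PySem.Set (List String) → PySem.Set (List String)
  | _, [], final => final
  | 0, _ :: _, final => final
  | fuel + 1, (s, step) :: rest, final =>
    if step = n then
      aLoop cands n fuel rest (PySem.Set.add final (PySem.List.sorted s (fun x => x) false))
    else
      aLoop cands n fuel
        (((cands.getD step []).foldl (fun acc u =>
            if (PySem.Set.add s u).length < step + 1 then acc
            else acc ++ [(PySem.Set.add s u, step + 1)]) []) ++ rest)
        final

def solution (user_id : List String) (banned_id : List String) : Int :=
  let id_by_length := user_id.foldl bucketStep (List.replicate 9 ([] : List String))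
  let ban_candidates := banned_id.map (fun bid =>
    (id_by_length.getD bid.toList.length []).foldl
      (fun acc uid => if pyMatchA bid.toList uid.toList then acc ++ [uid] else acc) [])
  let n := banned_id.length
  let K := (ban_candidates.map List.length).foldl max 0
  let stack0 : List (PySem.Set String × Nat) :=
    (ban_candidates.getD 0 []).map (fun c => (PySem.Set.ofList [c], 1))
  Int.ofNat (aLoop ban_candidates n ((K + 1) ^ (n + 1)) stack0 PySem.Set.empty).length

-- ===== PORT B =====
def bMatch (bid : String) (uid : String) : Bool :=
  (uid.toList.length == bid.toList.length) &&
    (bid.toList.zip uid.toList).all (fun p => p.1 == '*' || p.1 == p.2)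

-- B's recursive backtracking rec(step, chosen); the gas argument only makes the recursion
-- total (the recursion depth is n - step, so gas = n + 1 at step 0 never runs out)
def bRec (cands : List (List String)) (n : Nat) :
    Nat → Nat → PySem.Set String → PySem.Set (List String) → PySem.Set (List String)
  | 0, _, _, result => result
  | gas + 1, step, chosen, result =>
    if step = n then PySem.Set.add result (PySem.List.sorted chosen (fun x => x) false)
    else (cands.getD step []).foldl
      (fun res u =>
        if PySem.Set.contains chosen u then res
        else bRec cands n gas (step + 1) (PySem.Set.add chosen u) res)
      result

def solution_alt (user_id : List String) (banned_id : List String) : Int :=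
  let candidates := banned_id.map (fun bid => user_id.filter (fun uid => bMatch bid uid))
  Int.ofNat
    (bRec candidates banned_id.length (banned_id.length + 1) 0 PySem.Set.empty PySem.Set.empty).length

-- ===== PRECONDITION & SPEC =====
-- Pre_ excludes exactly the inputs on which A raises IndexError: an empty banned_id
-- (ban_candidates[0]) or any id of length > 8 (id_by_length has only 9 buckets).
def Pre_solution (user_id : List String) (banned_id : List String) : Prop :=
  banned_id ≠ [] ∧ (∀ s ∈ user_id, s.toList.length ≤ 8) ∧ (∀ b ∈ banned_id, b.toList.length ≤ 8)
instance (user_id : List String) (banned_id : List String) : Decidable (Pre_solution user_id banned_id) := by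
  unfold Pre_solution; infer_instance

def pvWitness_solution : List String × List String := (["ab", "cd"], ["a*"])

def Spec_solution (user_id : List String) (banned_id : List String) (out : Int) : Prop :=
  out = solution_alt user_id banned_id
instance (user_id : List String) (banned_id : List String) (out : Int) : Decidable (Spec_solution user_id banned_id out) := by
  unfold Spec_solution; infer_instance

-- ===== CLAIM (what is proved, stated in full; the proofs are below) =====
def Claim_equal_solution : Prop := ∀ (user_id : List String) (banned_id : List String), Dom_solution user_id banned_id → Pre_solution user_id banned_id → Spec_solution user_id banned_id (solution user_id banned_id)


-- ===== LEMMAS AND PROOFS =====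

def gen (cands : List (List String)) (n : Nat) : Nat → Nat → PySem.Set String → List (List String)
  | 0, _, _ => []
  | gas + 1, step, chosen =>
    if step = n then [PySem.List.sorted chosen (fun x => x) false]
    else (cands.getD step []).flatMap (fun u =>
      if PySem.Set.contains chosen u then [] else gen cands n gas (step + 1) (PySem.Set.add chosen u))

lemma bRec_mem (cands : List (List String)) (n : Nat) :
    ∀ gas step chosen result x,
      x ∈ bRec cands n gas step chosen result ↔ x ∈ result ∨ x ∈ gen cands n gas step chosen := by
  intro gas
  induction gas with
  | zero => intro step chosen result x; simp [bRec, gen]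
  | succ gas ih =>
    intro step chosen result x
    by_cases h : step = n
    · simp [bRec, gen, h, PySem.Set.mem_add]
    · simp only [bRec, gen, if_neg h]
      induction (cands.getD step []) generalizing result with
      | nil => simp
      | cons u l ihl =>
        simp only [List.foldl_cons, List.flatMap_cons, List.mem_append]
        by_cases hc : PySem.Set.contains chosen u
        · simp only [hc, if_true]
          rw [ihl]
          simp
        · simp only [hc, if_false, Bool.false_eq_true]
          rw [ihl, ih]
          tauto

lemma bRec_nodup (cands : List (List String)) (n : Nat) :
    ∀ gas step chosen result, result.Nodup → (bRec cands n gas step chosen result).Nodup := by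
  intro gas
  induction gas with
  | zero => intro _ _ result h; simpa [bRec] using h
  | succ gas ih =>
    intro step chosen result h
    by_cases hs : step = n
    · simpa [bRec, hs] using PySem.Set.nodup_add _ _ h
    · simp only [bRec, if_neg hs]
      induction (cands.getD step []) generalizing result with
      | nil => simpa
      | cons u l ihl =>
        simp only [List.foldl_cons]
        by_cases hc : PySem.Set.contains chosen u
        · simp only [hc, if_true]; exact ihl _ h
        · simp only [hc, if_false, Bool.false_eq_true]
          exact ihl _ (ih _ _ _ h)

lemma aLoop_nodup (cands : List (List String)) (n : Nat) :
    ∀ fuel stack final, final.Nodup → (aLoop cands n fuel stack final).Nodup := by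
  intro fuel
  induction fuel with
  | zero => intro stack final h; cases stack <;> simpa [aLoop]
  | succ fuel ih =>
    intro stack final h
    match stack with
    | [] => simpa [aLoop]
    | (s, step) :: rest =>
      by_cases hs : step = n
      · simp only [aLoop, if_pos hs]
        exact ih _ _ (PySem.Set.nodup_add _ _ h)
      · simp only [aLoop, if_neg hs]
        exact ih _ _ h

lemma length_add (s : PySem.Set String) (u : String) :
    (PySem.Set.add s u).length = if u ∈ s then s.length else s.length + 1 := by
  simp [PySem.Set.add, PySem.Set.contains]; split <;> simp_all

lemma foldl_skip_append {α β : Type} (p : α → Prop) [DecidablePred p] (f : α → β)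
    (l : List α) (acc : List β) :
    l.foldl (fun acc x => if p x then acc else acc ++ [f x]) acc
      = acc ++ (l.filter (fun x => !decide (p x))).map f := by
  have h : (fun (acc : List β) (x : α) => if p x then acc else acc ++ [f x])
      = fun acc x => if (!decide (p x)) = true then acc ++ [f x] else acc := by
    funext acc x; by_cases hp : p x <;> simp [hp]
  rw [h, PySem.List.foldl_append_if]

def aMeasure (K n : Nat) (stack : List (PySem.Set String × Nat)) : Nat :=
  (stack.map (fun e => (K + 1) ^ (n - e.2))).sum

lemma aLoop_mem (cands : List (List String)) (n K : Nat) (hK : ∀ c ∈ cands, c.length ≤ K) :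
    ∀ fuel stack final,
      (∀ e ∈ stack, e.2 ≤ n ∧ e.1.length = e.2) →
      aMeasure K n stack ≤ fuel →
      ∀ x, x ∈ aLoop cands n fuel stack final ↔
        x ∈ final ∨ ∃ e ∈ stack, x ∈ gen cands n (n + 1 - e.2) e.2 e.1 := by
  intro fuel
  induction fuel with
  | zero =>
    intro stack final hinv hm x
    match stack with
    | [] => simp [aLoop]
    | (s, step) :: rest =>
      exfalso
      have h1 : 1 ≤ (K + 1) ^ (n - step) := Nat.one_le_pow _ _ (by omega)
      simp only [aMeasure, List.map_cons, List.sum_cons] at hm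
      omega
  | succ fuel ih =>
    intro stack final hinv hm x
    match stack with
    | [] => simp [aLoop]
    | (s, step) :: rest =>
      obtain ⟨hstep, hlen⟩ := hinv _ (List.mem_cons_self)
      simp only at hstep hlen
      have hinvr : ∀ e ∈ rest, e.2 ≤ n ∧ e.1.length = e.2 :=
        fun e he => hinv e (List.mem_cons_of_mem _ he)
      have hmc : (K + 1) ^ (n - step) + aMeasure K n rest ≤ fuel + 1 := by
        simpa [aMeasure] using hm
      by_cases hs : step = n
      · simp only [aLoop, if_pos hs]
        have hmc' : 1 + aMeasure K n rest ≤ fuel + 1 := by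
          rw [hs, Nat.sub_self, pow_zero] at hmc; exact hmc
        rw [ih rest _ hinvr (by omega) x]
        have h1 : n + 1 - step = 1 := by omega
        simp only [PySem.Set.mem_add, List.mem_cons]
        constructor
        · rintro ((hx | hx) | hx)
          · exact Or.inl hx
          · refine Or.inr ⟨(s, step), Or.inl rfl, ?_⟩
            simp only [h1]
            simp [gen, hs, hx]
          · obtain ⟨e, he, hg⟩ := hx; exact Or.inr ⟨e, Or.inr he, hg⟩
        · rintro (hx | ⟨e, he | he, hg⟩)
          · exact Or.inl (Or.inl hx)
          · subst he
            simp only [h1] at hg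
            simp [gen, hs] at hg
            exact Or.inl (Or.inr hg)
          · exact Or.inr ⟨e, he, hg⟩
      · have hlt : step < n := by omega
        simp only [aLoop, if_neg hs]
        rw [foldl_skip_append, List.nil_append]
        set l := cands.getD step [] with hl
        have hlK : l.length ≤ K := by
          by_cases hc : step < cands.length
          · rw [hl, List.getD_eq_getElem?_getD, List.getElem?_eq_getElem hc]
            exact hK _ (List.getElem_mem hc)
          · rw [hl, List.getD_eq_getElem?_getD, List.getElem?_eq_none (by omega)]
            simp
        set children := (l.filter (fun u => !decide ((PySem.Set.add s u).length < step + 1))).map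
          (fun u => (PySem.Set.add s u, step + 1)) with hch
        have hmem : ∀ e ∈ children, e.2 ≤ n ∧ e.1.length = e.2 := by
          intro e he
          rw [hch] at he
          obtain ⟨u, hu, rfl⟩ := List.mem_map.mp he
          obtain ⟨hul, hup⟩ := List.mem_filter.mp hu
          have hni : u ∉ s := by
            intro hin
            rw [length_add] at hup
            simp [hin, hlen] at hup
          refine ⟨by omega, ?_⟩
          simp only
          rw [length_add]; simp [hni, hlen]
        have hX : 1 ≤ (K + 1) ^ (n - step - 1) := Nat.one_le_pow _ _ (by omega)
        have hmul : children.length * (K + 1) ^ (n - step - 1) ≤ K * (K + 1) ^ (n - step - 1) := by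
          apply Nat.mul_le_mul_right
          calc children.length ≤ l.length := by
                rw [hch, List.length_map]; exact List.length_filter_le _ _
            _ ≤ K := hlK
        have hpow : (K + 1) ^ (n - step) = K * (K + 1) ^ (n - step - 1) + (K + 1) ^ (n - step - 1) := by
          have h2 : n - step = (n - step - 1) + 1 := by omega
          conv_lhs => rw [h2, pow_succ]
          ring
        have hsum : aMeasure K n children = children.length * (K + 1) ^ (n - step - 1) := by
          rw [hch, aMeasure, List.map_map]
          have h3 : ((fun e : PySem.Set String × Nat => (K + 1) ^ (n - e.2)) ∘
              fun u => (PySem.Set.add s u, step + 1))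
              = fun _ : String => (K + 1) ^ (n - step - 1) := by
            funext u; simp [Nat.sub_sub]
          rw [h3, List.map_const', List.sum_replicate, List.length_map, smul_eq_mul]
        have hμ : aMeasure K n (children ++ rest) ≤ fuel := by
          have h4 : aMeasure K n (children ++ rest) = aMeasure K n children + aMeasure K n rest := by
            simp [aMeasure]
          omega
        have hinv2 : ∀ e ∈ children ++ rest, e.2 ≤ n ∧ e.1.length = e.2 := by
          intro e he
          rcases List.mem_append.mp he with h | h
          · exact hmem e h
          · exact hinvr e h
        rw [ih _ _ hinv2 hμ x]
        have hgen : (∃ e ∈ children, x ∈ gen cands n (n + 1 - e.2) e.2 e.1) ↔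
            x ∈ gen cands n (n + 1 - step) step s := by
          have hns : n + 1 - step = (n - step) + 1 := by omega
          have hns2 : n - step = n + 1 - (step + 1) := by omega
          rw [hns]
          simp only [gen, if_neg hs, List.mem_flatMap, ← hl]
          constructor
          · rintro ⟨e, he, hg⟩
            rw [hch] at he
            obtain ⟨u, hu, rfl⟩ := List.mem_map.mp he
            obtain ⟨hul, hup⟩ := List.mem_filter.mp hu
            have hni : u ∉ s := by
              intro hin; rw [length_add] at hup; simp [hin, hlen] at hup
            refine ⟨u, hul, ?_⟩
            have hcc : PySem.Set.contains s u = false := by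
              rw [← Bool.not_eq_true]; simpa [PySem.Set.contains_iff] using hni
            simp only [hcc, Bool.false_eq_true, if_false]
            simpa [← hns2] using hg
          · rintro ⟨u, hu, hg⟩
            by_cases hin : u ∈ s
            · have hcc : PySem.Set.contains s u = true := (PySem.Set.contains_iff s u).mpr hin
              rw [if_pos hcc] at hg
              exact absurd hg (List.not_mem_nil)
            · refine ⟨(PySem.Set.add s u, step + 1), ?_, ?_⟩
              · rw [hch]
                apply List.mem_map.mpr
                refine ⟨u, List.mem_filter.mpr ⟨hu, ?_⟩, rfl⟩
                rw [length_add]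
                simp [hin, hlen]
              · have hcc : PySem.Set.contains s u = false := by
                  rw [← Bool.not_eq_true]; simpa [PySem.Set.contains_iff] using hin
                simp only [hcc, Bool.false_eq_true, if_false] at hg
                simpa [← hns2] using hg
        constructor
        · rintro (hx | ⟨e, he, hg⟩)
          · exact Or.inl hx
          · rcases List.mem_append.mp he with h | h
            · exact Or.inr ⟨(s, step), List.mem_cons_self, hgen.mp ⟨e, h, hg⟩⟩
            · exact Or.inr ⟨e, List.mem_cons_of_mem _ h, hg⟩
        · rintro (hx | ⟨e, he, hg⟩)
          · exact Or.inl hx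
          · rcases List.mem_cons.mp he with rfl | h
            · obtain ⟨e', he', hg'⟩ := hgen.mpr hg
              exact Or.inr ⟨e', List.mem_append.mpr (Or.inl he'), hg'⟩
            · exact Or.inr ⟨e, List.mem_append.mpr (Or.inr h), hg⟩

lemma pyMatchA_eq : ∀ bs us : List Char,
    pyMatchA bs us = (bs.zip us).all (fun p => p.1 == '*' || p.1 == p.2) := by
  intro bs
  induction bs with
  | nil => intro us; simp [pyMatchA]
  | cons b bs ih =>
    intro us
    cases us with
    | nil => simp [pyMatchA]
    | cons u us =>
      by_cases hb : b = '*'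
      · simp [pyMatchA, hb, ih]
      · by_cases hu : b = u
        · simp [pyMatchA, hu, ih]
        · simp [pyMatchA, hb, hu, Ne.symm]

lemma bucket_getD : ∀ (us : List String) (acc : List (List String)),
    acc.length = 9 → (∀ u ∈ us, u.toList.length ≤ 8) → ∀ ℓ, ℓ ≤ 8 →
      (us.foldl bucketStep acc).getD ℓ []
        = acc.getD ℓ [] ++ us.filter (fun u2 => u2.toList.length == ℓ) := by
  intro us
  induction us with
  | nil => intro acc _ _ ℓ _; simp
  | cons u us ih =>
    intro acc hlen hall ℓ hℓ
    have hu8 : u.toList.length ≤ 8 := hall u List.mem_cons_self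
    have hall' : ∀ v ∈ us, v.toList.length ≤ 8 := fun v hv => hall v (List.mem_cons_of_mem _ hv)
    have hset : (bucketStep acc u).length = 9 := by simp [bucketStep, hlen]
    rw [List.foldl_cons, ih _ hset hall' ℓ hℓ]
    by_cases he : u.toList.length = ℓ
    · have : (bucketStep acc u).getD ℓ [] = acc.getD ℓ [] ++ [u] := by
        rw [bucketStep, List.getD_eq_getElem?_getD, he, List.getElem?_set_self (by omega)]
        rw [List.getD_eq_getElem?_getD]
        rfl
      rw [this, List.filter_cons_of_pos (by simpa using he), List.append_assoc]
      rfl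
    · have : (bucketStep acc u).getD ℓ [] = acc.getD ℓ [] := by
        rw [bucketStep, List.getD_eq_getElem?_getD, List.getElem?_set_ne he, ← List.getD_eq_getElem?_getD]
      rw [this, List.filter_cons_of_neg (by simpa using he)]

theorem solution_equal (user banned : List String)
    (hne : banned ≠ []) (hu8 : ∀ s ∈ user, s.toList.length ≤ 8)
    (hb8 : ∀ b ∈ banned, b.toList.length ≤ 8) :
    solution user banned = solution_alt user banned := by
  have hn : 1 ≤ banned.length := List.length_pos_iff.mpr hne
  simp only [solution, solution_alt]
  have hcands : banned.map (fun bid =>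
      ((user.foldl bucketStep (List.replicate 9 [])).getD bid.toList.length []).foldl
        (fun acc uid => if pyMatchA bid.toList uid.toList then acc ++ [uid] else acc) [])
      = banned.map (fun bid => user.filter (fun uid => bMatch bid uid)) := by
    apply List.map_congr_left
    intro bid hbid
    have hrep : (List.replicate 9 ([] : List String)).getD bid.toList.length [] = [] := by
      rw [List.getD_eq_getElem?_getD, List.getElem?_replicate]
      split <;> rfl
    rw [bucket_getD user _ (by simp) hu8 _ (hb8 bid hbid), hrep, List.nil_append,
      PySem.List.foldl_append_if (fun uid : String => pyMatchA bid.toList uid.toList) (fun x : String => x),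
      List.nil_append, List.map_id', List.filter_filter]
    apply List.filter_congr
    intro uid _
    simp [bMatch, pyMatchA_eq, Bool.and_comm]
  rw [hcands]
  set C := banned.map (fun bid => user.filter (fun uid => bMatch bid uid)) with hC
  set n := banned.length with hnn
  set K := (C.map List.length).foldl max 0 with hKdef
  have hK : ∀ c ∈ C, c.length ≤ K :=
    fun c hc => (PySem.List.le_foldl_max (C.map List.length) 0).2 _ (List.mem_map_of_mem hc)
  have hCn : C.length = n := by rw [hC, List.length_map]
  have hL0 : (C.getD 0 []).length ≤ K := by
    rw [List.getD_eq_getElem?_getD, List.getElem?_eq_getElem (by omega)]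
    exact hK _ (List.getElem_mem (by omega))
  have hofl : ∀ c : String, PySem.Set.ofList [c] = [c] := fun c => rfl
  have hadd : ∀ u : String, PySem.Set.add ([] : PySem.Set String) u = [u] := fun u => rfl
  set stack0 := (C.getD 0 []).map (fun c => (PySem.Set.ofList [c], (1 : Nat))) with hs0
  have hinv0 : ∀ e ∈ stack0, e.2 ≤ n ∧ e.1.length = e.2 := by
    intro e he
    obtain ⟨c, _, rfl⟩ := List.mem_map.mp he
    exact ⟨by omega, by rw [hofl]; rfl⟩
  have hX : 1 ≤ (K + 1) ^ (n - 1) := Nat.one_le_pow _ _ (by omega)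
  have hμ0 : aMeasure K n stack0 ≤ (K + 1) ^ (n + 1) := by
    have hsum : aMeasure K n stack0 = (C.getD 0 []).length * (K + 1) ^ (n - 1) := by
      rw [hs0, aMeasure, List.map_map]
      have h3 : ((fun e : PySem.Set String × Nat => (K + 1) ^ (n - e.2)) ∘
          fun c => (PySem.Set.ofList [c], (1 : Nat))) = fun _ : String => (K + 1) ^ (n - 1) := by
        funext c; rfl
      rw [h3, List.map_const', List.sum_replicate]
      simp [mul_comm]
    rw [hsum]
    calc (C.getD 0 []).length * (K + 1) ^ (n - 1)
        ≤ K * (K + 1) ^ (n - 1) := Nat.mul_le_mul_right _ hL0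
      _ ≤ (K + 1) * (K + 1) ^ (n - 1) := Nat.mul_le_mul_right _ (by omega)
      _ = (K + 1) ^ (n - 1 + 1) := by rw [pow_succ]; ring
      _ ≤ (K + 1) ^ (n + 1) := Nat.pow_le_pow_right (by omega) (by omega)
  have hFA : ∀ x, x ∈ aLoop C n ((K + 1) ^ (n + 1)) stack0 PySem.Set.empty ↔
      ∃ c ∈ C.getD 0 [], x ∈ gen C n n 1 [c] := by
    intro x
    rw [aLoop_mem C n K hK _ _ _ hinv0 hμ0 x]
    constructor
    · rintro (hx | ⟨e, he, hg⟩)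
      · exact absurd hx (List.not_mem_nil)
      · obtain ⟨c, hc, rfl⟩ := List.mem_map.mp he
        refine ⟨c, hc, ?_⟩
        simpa [hofl c] using hg
    · rintro ⟨c, hc, hg⟩
      refine Or.inr ⟨(PySem.Set.ofList [c], 1), List.mem_map_of_mem hc, ?_⟩
      simpa [hofl c] using hg
  have hFB : ∀ x, x ∈ bRec C n (n + 1) 0 PySem.Set.empty PySem.Set.empty ↔
      ∃ c ∈ C.getD 0 [], x ∈ gen C n n 1 [c] := by
    intro x
    rw [bRec_mem C n (n + 1) 0 _ _ x]
    have hgen0 : gen C n (n + 1) 0 PySem.Set.empty = (C.getD 0 []).flatMap (fun u => gen C n n 1 [u]) := by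
      simp only [gen, if_neg (by omega : ¬(0 : Nat) = n)]
      refine congrFun (congrArg _ (funext fun u => ?_)) _
      rw [if_neg (by simp [PySem.Set.contains])]
      rfl
    constructor
    · rintro (hx | hx)
      · exact absurd hx (List.not_mem_nil)
      · rw [hgen0] at hx
        exact List.mem_flatMap.mp hx
    · intro hx
      exact Or.inr (by rw [hgen0]; exact List.mem_flatMap.mpr hx)
  have hnd1 : (aLoop C n ((K + 1) ^ (n + 1)) stack0 PySem.Set.empty).Nodup :=
    aLoop_nodup C n _ _ _ List.nodup_nil
  have hnd2 : (bRec C n (n + 1) 0 PySem.Set.empty PySem.Set.empty).Nodup :=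
    bRec_nodup C n _ _ _ _ List.nodup_nil
  have hperm := (List.perm_ext_iff_of_nodup hnd1 hnd2).mpr
    (fun a => (hFA a).trans (hFB a).symm)
  rw [hperm.length_eq]

-- ===== VERDICT (by name: the statement is the Claim_ definition above) =====
theorem solution_spec : Claim_equal_solution := by
  intro user banned _ hpre
  unfold Spec_solution
  exact solution_equal user banned hpre.1 hpre.2.1 hpre.2.2
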